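-- pv_equiv track=rewrite | github.com/ksinuss/olympiads-courses | diagnostic_python/advance/5/5.py | form_output
-- ===== SOURCE A (Python) =====
-- def form_output(events: list):
--     events_ = sorted(events, key=lambda x: (x[0], x[1]))
--     spiral_dict = {}
--     for event in events_:
--         area = event[2]
--         event_list = [
--             event[0],
--             event[1]
--         ]
--         if area not in spiral_dict:
--             spiral_dict[area] = [event_list]
--         else:
--             spiral_dict[area].append(event_list)
--     return spiral_dict
-- ===== SOURCE B (Python) =====
-- def form_output(events: list):
--     events_ = sorted(events, key=lambda x: (x[0], x[1]))
--     areas = list(dict.fromkeys(e[2] for e in events_))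
--     return {a: [[e[0], e[1]] for e in events_ if e[2] == a] for a in areas}
-- ===== Notes on version B (the rewrite author's own statement) =====
-- stated objective: alternative
-- what changed: Replaces A's incremental dict building (membership test then insert-or-append per event) by a declarative two-pass decomposition: collect the distinct areas in first-occurrence order with dict.fromkeys, then build each area's value list with one filtering comprehension over the sorted events.
import Mathlib
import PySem

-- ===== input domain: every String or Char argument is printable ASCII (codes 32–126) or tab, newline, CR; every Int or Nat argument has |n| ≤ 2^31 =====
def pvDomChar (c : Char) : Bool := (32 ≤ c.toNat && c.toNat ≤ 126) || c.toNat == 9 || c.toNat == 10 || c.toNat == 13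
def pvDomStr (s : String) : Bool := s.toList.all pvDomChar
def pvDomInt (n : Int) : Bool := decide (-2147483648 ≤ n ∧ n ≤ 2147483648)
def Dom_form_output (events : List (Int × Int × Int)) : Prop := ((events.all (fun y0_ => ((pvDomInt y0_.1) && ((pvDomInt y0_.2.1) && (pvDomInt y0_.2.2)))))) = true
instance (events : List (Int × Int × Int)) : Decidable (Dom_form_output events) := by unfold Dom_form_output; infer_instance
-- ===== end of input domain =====

-- B replaces A's incremental dict building by ordered-distinct areas + a per-area filter (alternative decomposition; same return value).
-- ===== PORT A =====
def form_output (events : List (Int × Int × Int)) : List (Int × List (List Int)) :=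
  let events_ := PySem.List.sorted2 events (fun x => x.1) (fun x => x.2.1)
  let spiral_dict : PySem.Dict Int (List (List Int)) :=
    events_.foldl (fun spiral_dict event =>
      let area := event.2.2
      let event_list := [event.1, event.2.1]
      if spiral_dict.contains area = false then
        spiral_dict.insert area [event_list]
      else
        spiral_dict.modify area [] (fun l => l ++ [event_list])) PySem.Dict.empty
  spiral_dict.items

-- ===== PORT B =====
def form_output_alt (events : List (Int × Int × Int)) : List (Int × List (List Int)) :=
  let events_ := PySem.List.sorted2 events (fun x => x.1) (fun x => x.2.1)
  let areas := PySem.List.dedup (events_.map (fun e => e.2.2))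
  areas.map (fun a => (a, (events_.filter (fun e => e.2.2 == a)).map (fun e => [e.1, e.2.1])))

-- ===== PRECONDITION & SPEC =====
def Spec_form_output (events : List (Int × Int × Int)) (out : List (Int × List (List Int))) : Prop := out = form_output_alt events
instance (events : List (Int × Int × Int)) (out : List (Int × List (List Int))) : Decidable (Spec_form_output events out) := by unfold Spec_form_output; infer_instance

-- ===== CLAIM (what is proved, stated in full; the proofs are below) =====
def Claim_equal_form_output : Prop := ∀ (events : List (Int × Int × Int)), Dom_form_output events → Spec_form_output events (form_output events)

-- ===== LEMMAS AND PROOFS =====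

-- ===== VERDICT (by name: the statement is the Claim_ definition above) =====
-- A's loop step equals an unconditional modify-append (insert of [el] when the key is absent IS modify with default []).
theorem step_eq_modify (d : PySem.Dict Int (List (List Int))) (e : Int × Int × Int) :
    (if d.contains e.2.2 = false then d.insert e.2.2 [[e.1, e.2.1]]
     else d.modify e.2.2 [] (fun l => l ++ [[e.1, e.2.1]]))
    = d.modify e.2.2 [] (fun l => l ++ [[e.1, e.2.1]]) := by
  split
  · next h => simp [PySem.Dict.modify, PySem.Dict.getD_of_not_contains d [] h]
  · rfl

-- the grouping fold, characterised: items = keys in first-occurrence order, each with its filtered values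
theorem fold_items (l : List (Int × Int × Int)) :
    (l.foldl (fun (d : PySem.Dict Int (List (List Int))) e =>
        d.modify e.2.2 [] (fun v => v ++ [[e.1, e.2.1]])) PySem.Dict.empty).items
    = (PySem.List.dedup (l.map (fun e => e.2.2))).map
        (fun a => (a, (l.filter (fun e => e.2.2 == a)).map (fun e => [e.1, e.2.1]))) := by
  rw [show (fun (d : PySem.Dict Int (List (List Int))) (e : Int × Int × Int) =>
        d.modify e.2.2 [] (fun v => v ++ [[e.1, e.2.1]]))
      = fun d e => d.modify ((fun (e : Int × Int × Int) => (e.2.2, [e.1, e.2.1])) e).1 []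
          (fun v => v ++ [((fun (e : Int × Int × Int) => (e.2.2, [e.1, e.2.1])) e).2]) from rfl,
      ← List.foldl_map (f := fun (e : Int × Int × Int) => (e.2.2, [e.1, e.2.1]))
        (g := fun (d : PySem.Dict Int (List (List Int))) p => d.modify p.1 [] (fun v => v ++ [p.2]))]
  set l' := l.map (fun e => (e.2.2, [e.1, e.2.1])) with hl'
  have hnd : ((l'.foldl (fun (d : PySem.Dict Int (List (List Int))) p =>
      d.modify p.1 [] (fun v => v ++ [p.2])) PySem.Dict.empty)).keys.Nodup :=
    PySem.Dict.nodup_keys_foldl_modify_key l' (fun p => p.1) []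
      (fun d p => fun v => v ++ [p.2]) PySem.Dict.empty (by simp [PySem.Dict.empty])
  rw [PySem.Dict.items_eq_map_keys _ hnd [], PySem.Dict.keys_foldl_modify_key,
      PySem.Dict.keys_empty, PySem.Set.update_nil_left]
  have hkeys : PySem.Set.ofList (l'.map (fun p => p.1)) = PySem.List.dedup (l.map (fun e => e.2.2)) := by
    simp [hl', List.map_map, PySem.List.dedup_eq_ofList, Function.comp_def]
  rw [hkeys]
  apply List.map_congr_left
  intro a _
  rw [PySem.Dict.getD_foldl_modify_append]
  simp [hl', List.filter_map, List.map_map, Function.comp_def, PySem.Dict.getD_empty]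

theorem form_output_spec : Claim_equal_form_output := by
  intro events _
  unfold Spec_form_output form_output form_output_alt
  simp only []
  have h : (fun (d : PySem.Dict Int (List (List Int))) (e : Int × Int × Int) =>
      if d.contains e.2.2 = false then d.insert e.2.2 [[e.1, e.2.1]]
      else d.modify e.2.2 [] (fun l => l ++ [[e.1, e.2.1]]))
      = fun d e => d.modify e.2.2 [] (fun v => v ++ [[e.1, e.2.1]]) := by
    funext d e; exact step_eq_modify d e
  rw [h]
  exact fold_items _
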